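-- pv_equiv track=rewrite | github.com/yinyindecongcong/Crypt_decrypt_algorithm | algorithm/Rotor.py | crypt_rotor_one_word
-- ===== SOURCE A (Python) =====
-- def crypt_rotor_one_word(word, ls1, ls2):
--     left_ls1, left_ls2 = [i for i in range(26)], [i for i in range(26)]
--     right_ls1, right_ls2 = ls1, ls2
--     res = ''
--     for letter in word.lower():
--         in1 = left_ls1[ord(letter) - ord('a')]
--         out1 = right_ls1.index(in1)
--         in2 = left_ls2[out1]
--         out2= right_ls2.index(in2)
--         res += chr(out2 + ord('a'))
--         left_ls1, right_ls1 = left_ls1[-1:] + left_ls1[:-1], right_ls1[-1:] + right_ls1[:-1]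
--         if left_ls1[0] == 0:
--             left_ls2, right_ls2 = left_ls2[-1:] + left_ls2[:-1], right_ls2[-1:] + right_ls2[:-1]
--     return res
-- ===== SOURCE B (Python) =====
-- def crypt_rotor_one_word(word, ls1, ls2):
--     # offsets + inverse maps instead of physically rotating four lists
--     inv1 = {v: i for i, v in enumerate(ls1)}
--     inv2 = {v: i for i, v in enumerate(ls2)}
--     n1, n2 = len(ls1), len(ls2)
--     out = []
--     for t, letter in enumerate(word.lower()):
--         in1 = (ord(letter) - 97 - t) % 26
--         out1 = (inv1[in1] + t) % n1
--         in2 = (out1 - t // 26) % 26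
--         out2 = (inv2[in2] + t // 26) % n2
--         out.append(chr(out2 + 97))
--     return ''.join(out)
-- ===== Notes on version B (the rewrite author's own statement) =====
-- stated objective: faster
-- what changed: B replaces A's four physically rotated 26-element lists and two per-letter linear .index scans by two inverse-lookup dictionaries built once plus integer offsets (t and t//26), computing each output letter with O(1) modular arithmetic and joining a char list instead of string +=.
-- outside the precondition, e.g. on crypt_rotor_one_word('a', [0, 0], [0, 1]): A returns 'a', B returns 'b'
import Mathlib
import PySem

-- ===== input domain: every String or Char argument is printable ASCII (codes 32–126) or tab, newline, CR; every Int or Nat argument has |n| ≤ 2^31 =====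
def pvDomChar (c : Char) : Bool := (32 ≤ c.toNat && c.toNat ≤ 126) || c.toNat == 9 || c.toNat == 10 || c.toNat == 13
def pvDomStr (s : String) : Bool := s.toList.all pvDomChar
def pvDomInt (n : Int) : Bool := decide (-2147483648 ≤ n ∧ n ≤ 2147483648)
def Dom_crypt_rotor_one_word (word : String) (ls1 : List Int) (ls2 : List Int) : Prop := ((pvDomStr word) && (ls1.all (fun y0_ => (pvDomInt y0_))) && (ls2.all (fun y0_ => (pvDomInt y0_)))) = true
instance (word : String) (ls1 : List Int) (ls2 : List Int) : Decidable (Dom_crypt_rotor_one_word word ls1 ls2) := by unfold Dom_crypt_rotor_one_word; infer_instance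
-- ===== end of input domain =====

-- B replaces A's four physically rotated 26-lists and per-letter linear `.index` scans by two
-- precomputed inverse dictionaries and integer offsets (one modular formula per letter).

-- ===== PORT A =====
-- [i for i in range(26)]
def pvId26 : List Int := (List.range 26).map Int.ofNat

-- l[-1:] + l[:-1]
def pvRotR (l : List Int) : List Int :=
  PySem.List.slice l (some (-1)) none ++ PySem.List.slice l none (some (-1))

-- one iteration of A's for-loop; state = (left_ls1, right_ls1, left_ls2, right_ls2, res)
def pvStepA (st : List Int × List Int × List Int × List Int × List Char) (letter : Char) :
    List Int × List Int × List Int × List Int × List Char :=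
  let in1 := (PySem.List.pyGet? st.1 ((letter.toNat : Int) - 97)).getD 0
  let out1 := (PySem.List.index? st.2.1 in1).getD 0
  let in2 := (PySem.List.pyGet? st.2.2.1 ((out1 : Nat) : Int)).getD 0
  let out2 := (PySem.List.index? st.2.2.2.1 in2).getD 0
  let res := st.2.2.2.2 ++ [Char.ofNat (out2 + 97)]
  let l1 := pvRotR st.1
  let r1 := pvRotR st.2.1
  if (PySem.List.pyGet? l1 0).getD 1 = 0 then
    (l1, r1, pvRotR st.2.2.1, pvRotR st.2.2.2.1, res)
  else
    (l1, r1, st.2.2.1, st.2.2.2.1, res)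

def crypt_rotor_one_word (word : String) (ls1 : List Int) (ls2 : List Int) : String :=
  let fin := (PySem.Str.lower word).toList.foldl pvStepA (pvId26, ls1, pvId26, ls2, ([] : List Char))
  String.ofList fin.2.2.2.2

-- ===== PORT B =====
-- {v: i for i, v in enumerate(l)}
def pvInv (l : List Int) : PySem.Dict Int Int :=
  (PySem.List.enumerate l 0).foldl (fun d p => d.insert p.2 p.1) PySem.Dict.empty

-- one iteration of B's for-loop over enumerate(word.lower()); p = (t, letter)
def pvStepB (inv1 inv2 : PySem.Dict Int Int) (n1 n2 : Int) (acc : List Char) (p : Int × Char) :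
    List Char :=
  let in1 := PySem.Int.mod ((p.2.toNat : Int) - 97 - p.1) 26
  let out1 := PySem.Int.mod (inv1.getD in1 0 + p.1) n1
  let in2 := PySem.Int.mod (out1 - PySem.Int.floordiv p.1 26) 26
  let out2 := PySem.Int.mod (inv2.getD in2 0 + PySem.Int.floordiv p.1 26) n2
  acc ++ [Char.ofNat (out2 + 97).toNat]

def crypt_rotor_one_word_alt (word : String) (ls1 : List Int) (ls2 : List Int) : String :=
  let inv1 := pvInv ls1
  let inv2 := pvInv ls2
  let out := (PySem.List.enumerate (PySem.Str.lower word).toList 0).foldl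
      (pvStepB inv1 inv2 (ls1.length : Int) (ls2.length : Int)) ([] : List Char)
  String.ofList out

-- ===== PRECONDITION & SPEC =====
def pvPerm26 (l : List Int) : Prop := l.Perm pvId26

-- Pre_ excludes (a) inputs where A raises (a character outside codes 65..122 gives IndexError,
-- a value missing from ls1/ls2 gives ValueError, out-of-range indices give IndexError), and
-- (b) nonempty words with ls1/ls2 not permutations of 0..25 — degenerate rotors on which A can
-- still return a value that depends on accidental first-occurrence positions in duplicate lists.
def Pre_crypt_rotor_one_word (word : String) (ls1 : List Int) (ls2 : List Int) : Prop :=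
  word.toList = [] ∨
    ((word.toList.all (fun c => 65 ≤ c.toNat && c.toNat ≤ 122)) = true
      ∧ pvPerm26 ls1 ∧ pvPerm26 ls2)
instance (word : String) (ls1 : List Int) (ls2 : List Int) :
    Decidable (Pre_crypt_rotor_one_word word ls1 ls2) := by
  unfold Pre_crypt_rotor_one_word pvPerm26; infer_instance

def pvWitness_crypt_rotor_one_word : String × List Int × List Int :=
  ("Ab_z",
   [0,1,2,3,4,5,6,7,8,9,10,11,12,13,14,15,16,17,18,19,20,21,22,23,24,25],
   [25,24,23,22,21,20,19,18,17,16,15,14,13,12,11,10,9,8,7,6,5,4,3,2,1,0])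

def Spec_crypt_rotor_one_word (word : String) (ls1 : List Int) (ls2 : List Int) (out : String) :
    Prop := out = crypt_rotor_one_word_alt word ls1 ls2
instance (word : String) (ls1 : List Int) (ls2 : List Int) (out : String) :
    Decidable (Spec_crypt_rotor_one_word word ls1 ls2 out) := by
  unfold Spec_crypt_rotor_one_word; infer_instance

-- ===== CLAIM (what is proved, stated in full; the proofs are below) =====
def Claim_equal_crypt_rotor_one_word : Prop := ∀ (word : String) (ls1 : List Int) (ls2 : List Int), Dom_crypt_rotor_one_word word ls1 ls2 → Pre_crypt_rotor_one_word word ls1 ls2 → Spec_crypt_rotor_one_word word ls1 ls2 (crypt_rotor_one_word word ls1 ls2)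

-- ===== LEMMAS AND PROOFS =====

theorem pvLowerChar_bounds (c : Char) (h1 : 65 ≤ c.toNat) (h2 : c.toNat ≤ 122) :
    91 ≤ (PySem.Chars.lowerChar c).toNat ∧ (PySem.Chars.lowerChar c).toNat ≤ 122 := by
  have hz : ('Z').val.toNat = 90 := rfl
  have ha : ('A').val.toNat = 65 := rfl
  have hc : c.toNat = c.val.toNat := rfl
  simp only [PySem.Chars.lowerChar, PySem.Chars.isupper]
  split
  · next h =>
    simp only [Bool.and_eq_true, decide_eq_true_eq, Char.le_def, UInt32.le_iff_toNat_le] at h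
    rw [Char.toNat_ofNat, if_pos (Or.inl (by omega))]
    omega
  · next h =>
    simp only [Bool.and_eq_true, decide_eq_true_eq, Char.le_def, UInt32.le_iff_toNat_le,
      not_and_or, not_le] at h
    omega

theorem pvId26_length : pvId26.length = 26 := by decide
theorem pvId26_nodup : pvId26.Nodup := by decide

theorem pvId26_getElem (i : Nat) (h : i < pvId26.length) : pvId26[i] = (i : Int) := by
  unfold pvId26 at h ⊢
  rw [List.getElem_map, List.getElem_range, Int.ofNat_eq_natCast]

theorem pvIdRot_get (t : Nat) (i : Int) (h1 : -26 ≤ i) (h2 : i < 26) :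
    PySem.List.pyGet? (pvId26.rotate (25 * t)) i = some ((i - t) % 26) := by
  have hlen : (pvId26.rotate (25 * t)).length = 26 := by
    rw [List.length_rotate, pvId26_length]
  by_cases hi : 0 ≤ i
  · rw [show i = ((i.toNat : Nat) : Int) by omega, PySem.List.pyGet?_natCast,
      List.getElem?_eq_getElem (by omega), List.getElem_rotate, pvId26_getElem,
      pvId26_length]
    congr 1
    omega
  · rw [show i = -(((-i).toNat : Nat) : Int) by omega,
      PySem.List.pyGet?_neg_natCast _ _ (by omega) (by omega),
      List.getElem?_eq_getElem (by omega), List.getElem_rotate, pvId26_getElem,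
      pvId26_length, hlen]
    congr 1
    omega

theorem pvIndex?_of_nodup {l : List Int} (hnd : l.Nodup) {j : Nat} {v : Int}
    (hj : j < l.length) (hv : l[j] = v) : PySem.List.index? l v = some j := by
  rw [PySem.List.index?_eq_some_iff]
  refine ⟨l.take j, l.drop (j + 1), ?_, by simp [Nat.min_eq_left hj.le], ?_⟩
  · rw [← hv, List.getElem_cons_drop, List.take_append_drop]
  · intro hmem
    obtain ⟨i, hi, hvi⟩ := List.getElem_of_mem hmem
    have hij : i < j := by simpa using hi.trans_le (by simp)
    rw [List.getElem_take] at hvi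
    have := (List.Nodup.getElem_inj_iff hnd).1 (hvi.trans hv.symm)
    omega

theorem pvMem_of_perm (l : List Int) (hp : l.Perm pvId26) (v : Int)
    (hv0 : 0 ≤ v) (hv : v < 26) : v ∈ l := by
  refine hp.mem_iff.2 ?_
  simp only [pvId26, List.mem_map]
  refine ⟨v.toNat, List.mem_range.mpr (by omega), ?_⟩
  rw [Int.ofNat_eq_natCast]; omega

theorem pvIdxRot (l : List Int) (hp : l.Perm pvId26) (t : Nat) (v : Int)
    (hv0 : 0 ≤ v) (hv : v < 26) :
    PySem.List.index? (l.rotate (25 * t)) v = some ((l.idxOf v + t) % 26) := by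
  have hlen : l.length = 26 := by rw [hp.length_eq, pvId26_length]
  have hnd : l.Nodup := hp.nodup_iff.2 pvId26_nodup
  have hmem : v ∈ l := pvMem_of_perm l hp v hv0 hv
  have hidx : l.idxOf v < l.length := List.idxOf_lt_length_iff.2 hmem
  have hj : (l.idxOf v + t) % 26 < (l.rotate (25 * t)).length := by
    rw [List.length_rotate, hlen]; exact Nat.mod_lt _ (by omega)
  have harg : ((l.idxOf v + t) % 26 + 25 * t) % l.length = l.idxOf v := by
    rw [hlen]; omega
  refine pvIndex?_of_nodup (List.nodup_rotate.2 hnd) hj ?_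
  rw [List.getElem_rotate, getElem_congr_idx harg, List.getElem_idxOf]

theorem pvInv_preserve (xs : List Int) (v : Int) (hv : v ∉ xs) :
    ∀ (s : Int) (d : PySem.Dict Int Int),
      ((PySem.List.enumerate xs s).foldl (fun d p => d.insert p.2 p.1) d).getD v 0
        = d.getD v 0 := by
  induction xs with
  | nil => intro s d; rw [PySem.List.enumerate_nil]; rfl
  | cons x xs ih =>
    intro s d
    rw [PySem.List.enumerate_cons, List.foldl_cons]
    rw [ih (by simp at hv; exact hv.2)]
    exact PySem.Dict.getD_insert_of_ne _ _ _ (by simp at hv; exact hv.1)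

theorem pvInv_getD_aux (xs : List Int) (hnd : xs.Nodup) (v : Int) (hv : v ∈ xs) :
    ∀ (s : Int) (d : PySem.Dict Int Int),
      ((PySem.List.enumerate xs s).foldl (fun d p => d.insert p.2 p.1) d).getD v 0
        = s + (xs.idxOf v : Int) := by
  induction xs with
  | nil => simp at hv
  | cons x xs ih =>
    intro s d
    rw [PySem.List.enumerate_cons, List.foldl_cons]
    by_cases hvx : v = x
    · subst hvx
      have hnotin : v ∉ xs := (List.nodup_cons.1 hnd).1
      rw [pvInv_preserve xs v hnotin, PySem.Dict.getD_insert_self, List.idxOf_cons_self]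
      simp
    · rw [ih (List.nodup_cons.1 hnd).2
            (by rcases List.mem_cons.1 hv with h | h; exact absurd h hvx; exact h),
          List.idxOf_cons_ne _ (fun h => hvx h.symm)]
      push_cast
      ring

theorem pvInv_getD (l : List Int) (hnd : l.Nodup) (v : Int) (hv : v ∈ l) :
    (pvInv l).getD v 0 = (l.idxOf v : Int) := by
  rw [pvInv, pvInv_getD_aux l hnd v hv 0 PySem.Dict.empty, zero_add]

theorem pvRotR_eq_rotate (l : List Int) (h : l.length = 26) : pvRotR l = l.rotate 25 := by
  rw [pvRotR, PySem.List.slice_from_neg_one, PySem.List.slice_to_neg_one,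
      List.rotate_eq_drop_append_take (by omega), List.dropLast_eq_take, h]

theorem pvRotR_rotate_id (t : Nat) :
    pvRotR (pvId26.rotate (25 * t)) = pvId26.rotate (25 * (t + 1)) := by
  rw [pvRotR_eq_rotate _ (by rw [List.length_rotate, pvId26_length]), List.rotate_rotate]
  ring_nf

theorem pvRotR_rotate_perm (l : List Int) (hp : l.Perm pvId26) (t : Nat) :
    pvRotR (l.rotate (25 * t)) = l.rotate (25 * (t + 1)) := by
  rw [pvRotR_eq_rotate _ (by rw [List.length_rotate, hp.length_eq, pvId26_length]),
      List.rotate_rotate]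
  ring_nf

theorem pvLoop (ls1 ls2 : List Int) (h1 : pvPerm26 ls1) (h2 : pvPerm26 ls2) :
    ∀ (cs : List Char) (t : Nat) (acc : List Char),
      (∀ c ∈ cs, 91 ≤ c.toNat ∧ c.toNat ≤ 122) →
      (cs.foldl pvStepA
        (pvId26.rotate (25 * t), ls1.rotate (25 * t),
         pvId26.rotate (25 * (t / 26)), ls2.rotate (25 * (t / 26)), acc)).2.2.2.2
      = (PySem.List.enumerate cs (t : Int)).foldl
          (pvStepB (pvInv ls1) (pvInv ls2) (ls1.length : Int) (ls2.length : Int)) acc := by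
  have hl1 : ls1.length = 26 := by rw [h1.length_eq, pvId26_length]
  have hl2 : ls2.length = 26 := by rw [h2.length_eq, pvId26_length]
  have hnd1 : ls1.Nodup := h1.nodup_iff.2 pvId26_nodup
  have hnd2 : ls2.Nodup := h2.nodup_iff.2 pvId26_nodup
  intro cs
  induction cs with
  | nil =>
    intro t acc _
    rw [List.foldl_nil, PySem.List.enumerate_nil, List.foldl_nil]
  | cons c cs ih =>
    intro t acc hch
    obtain ⟨hc1, hc2⟩ := hch c List.mem_cons_self
    have hcs : ∀ c' ∈ cs, 91 ≤ c'.toNat ∧ c'.toNat ≤ 122 :=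
      fun c' h => hch c' (List.mem_cons_of_mem _ h)
    -- the values computed for this letter
    set v1 : Int := (((c.toNat : Int) - 97) - t) % 26 with hv1def
    have hv1a : 0 ≤ v1 := Int.emod_nonneg _ (by norm_num)
    have hv1b : v1 < 26 := Int.emod_lt_of_pos _ (by norm_num)
    set o1 : Nat := (ls1.idxOf v1 + t) % 26 with ho1def
    have ho1 : o1 < 26 := Nat.mod_lt _ (by omega)
    set v2 : Int := (((o1 : Nat) : Int) - (t / 26 : Nat)) % 26 with hv2def
    have hv2a : 0 ≤ v2 := Int.emod_nonneg _ (by norm_num)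
    have hv2b : v2 < 26 := Int.emod_lt_of_pos _ (by norm_num)
    set o2 : Nat := (ls2.idxOf v2 + t / 26) % 26 with ho2def
    -- A's step
    have hstep : pvStepA
        (pvId26.rotate (25 * t), ls1.rotate (25 * t),
         pvId26.rotate (25 * (t / 26)), ls2.rotate (25 * (t / 26)), acc) c
        = (pvId26.rotate (25 * (t + 1)), ls1.rotate (25 * (t + 1)),
           pvId26.rotate (25 * ((t + 1) / 26)), ls2.rotate (25 * ((t + 1) / 26)),
           acc ++ [Char.ofNat (o2 + 97)]) := by
      simp only [pvStepA]
      rw [pvIdRot_get t ((c.toNat : Int) - 97) (by omega) (by omega)]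
      simp only [Option.getD_some, ← hv1def]
      rw [pvIdxRot ls1 h1 t v1 hv1a hv1b]
      simp only [Option.getD_some, ← ho1def]
      rw [pvIdRot_get (t / 26) ((o1 : Nat) : Int) (by omega) (by exact_mod_cast ho1)]
      simp only [Option.getD_some, ← hv2def]
      rw [pvIdxRot ls2 h2 (t / 26) v2 hv2a hv2b]
      simp only [Option.getD_some, ← ho2def]
      rw [pvRotR_rotate_id t, pvRotR_rotate_perm ls1 h1 t,
          pvIdRot_get (t + 1) 0 (by norm_num) (by norm_num)]
      simp only [Option.getD_some]
      split_ifs with hcond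
      · have hdvd : (26 : Nat) ∣ (t + 1) := by
          have : ((0 : Int) - ((t : Nat) + 1)) % 26 = 0 := by exact_mod_cast hcond
          omega
        have hq : (t + 1) / 26 = t / 26 + 1 := by omega
        rw [pvRotR_rotate_id (t / 26), pvRotR_rotate_perm ls2 h2 (t / 26), hq]
      · have hdvd : ¬ (26 : Nat) ∣ (t + 1) := by
          intro hd
          apply hcond
          have : ((0 : Int) - ((t : Nat) + 1)) % 26 = 0 := by omega
          exact_mod_cast this
        have hq : (t + 1) / 26 = t / 26 := by omega
        rw [hq]
    -- B's step
    have hstepB : pvStepB (pvInv ls1) (pvInv ls2) (ls1.length : Int) (ls2.length : Int)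
        acc ((t : Int), c) = acc ++ [Char.ofNat (o2 + 97)] := by
      simp only [pvStepB]
      have hfd : PySem.Int.floordiv ((t : Nat) : Int) 26 = ((t / 26 : Nat) : Int) := by
        rw [PySem.Int.floordiv_eq_ediv_of_pos (by norm_num)]
        omega
      have hm1 : PySem.Int.mod (((c.toNat : Int) - 97) - (t : Int)) 26 = v1 := by
        rw [PySem.Int.mod_eq_emod_of_pos (by norm_num), hv1def]
      have hmem1 : v1 ∈ ls1 := pvMem_of_perm ls1 h1 v1 hv1a hv1b
      have hm2 : PySem.Int.mod ((pvInv ls1).getD v1 0 + (t : Int)) ((ls1.length : Nat) : Int)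
          = (o1 : Int) := by
        rw [pvInv_getD ls1 hnd1 v1 hmem1, hl1,
            PySem.Int.mod_eq_emod_of_pos (by norm_num)]
        rw [ho1def]
        push_cast
        omega
      have hm3 : PySem.Int.mod ((o1 : Int) - ((t / 26 : Nat) : Int)) 26 = v2 := by
        rw [PySem.Int.mod_eq_emod_of_pos (by norm_num), hv2def]
      have hmem2 : v2 ∈ ls2 := pvMem_of_perm ls2 h2 v2 hv2a hv2b
      have hm4 : PySem.Int.mod ((pvInv ls2).getD v2 0 + ((t / 26 : Nat) : Int))
          ((ls2.length : Nat) : Int) = (o2 : Int) := by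
        rw [pvInv_getD ls2 hnd2 v2 hmem2, hl2,
            PySem.Int.mod_eq_emod_of_pos (by norm_num)]
        rw [ho2def]
        push_cast
        omega
      rw [show ((c.toNat : Int) - 97 - ((t : Int), c).1) = (((c.toNat : Int) - 97) - (t : Int))
            by rfl]
      rw [hm1, hfd, hm2, hm3, hm4]
      have : ((o2 : Int) + 97).toNat = o2 + 97 := by omega
      rw [this]
    rw [List.foldl_cons, hstep, PySem.List.enumerate_cons, List.foldl_cons, hstepB,
        show ((t : Int) + 1) = (((t + 1 : Nat) : Nat) : Int) by push_cast; ring]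
    exact ih (t + 1) (acc ++ [Char.ofNat (o2 + 97)]) hcs

-- ===== VERDICT (by name: the statement is the Claim_ definition above) =====
theorem crypt_rotor_one_word_spec : Claim_equal_crypt_rotor_one_word := by
  intro word ls1 ls2 hdom hpre
  unfold Spec_crypt_rotor_one_word
  rcases hpre with hempty | ⟨hch, h1, h2⟩
  · simp only [crypt_rotor_one_word, crypt_rotor_one_word_alt, PySem.Str.toList_lower, hempty]
    rfl
  · simp only [crypt_rotor_one_word, crypt_rotor_one_word_alt]
    have hch' : ∀ c ∈ word.toList, 65 ≤ c.toNat ∧ c.toNat ≤ 122 := by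
      intro c hc
      have := List.all_eq_true.1 hch c hc
      simp only [Bool.and_eq_true, decide_eq_true_eq] at this
      exact this
    have hlow : ∀ c ∈ (PySem.Str.lower word).toList, 91 ≤ c.toNat ∧ c.toNat ≤ 122 := by
      rw [PySem.Str.toList_lower]
      simp only [PySem.Chars.lower, List.mem_map]
      rintro c ⟨c0, hc0, rfl⟩
      exact pvLowerChar_bounds c0 (hch' c0 hc0).1 (hch' c0 hc0).2
    have hmain := pvLoop ls1 ls2 h1 h2 (PySem.Str.lower word).toList 0 [] hlow
    simp only [Nat.mul_zero, Nat.zero_div, List.rotate_zero, Nat.cast_zero] at hmain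
    rw [hmain]
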